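-- pv_equiv track=rewrite | github.com/cafaray/atco.de-fights | areFollowingPatterns.py | areFollowingPatterns
-- ===== SOURCE A (Python) =====
-- from collections import defaultdict
--
-- def areFollowingPatterns(strings, patterns):
--     pats = defaultdict(set)
--     strs = defaultdict(set)
--     for w, p in zip(strings, patterns):
--         pats[p].add(w)
--         strs[w].add(p)
--
--     for p in pats:
--         if len(pats[p]) != 1:
--             return False
--
--     for w in strs:
--         if len(strs[w]) != 1:
--             return False
--
--     return True
-- ===== SOURCE B (Python) =====
-- def areFollowingPatterns(strings, patterns):
--     pairs = list(zip(strings, patterns))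
--     return all((w1 == w2) == (p1 == p2)
--                for (w1, p1) in pairs
--                for (w2, p2) in pairs)
-- ===== Notes on version B (the rewrite author's own statement) =====
-- stated objective: simpler
-- what changed: Drops the two defaultdict(set) tables and their validation loops in favour of one direct pairwise-consistency check over the zipped pairs (equal strings iff equal patterns at every pair of positions), trading expected O(n) for O(n^2).
import Mathlib
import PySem

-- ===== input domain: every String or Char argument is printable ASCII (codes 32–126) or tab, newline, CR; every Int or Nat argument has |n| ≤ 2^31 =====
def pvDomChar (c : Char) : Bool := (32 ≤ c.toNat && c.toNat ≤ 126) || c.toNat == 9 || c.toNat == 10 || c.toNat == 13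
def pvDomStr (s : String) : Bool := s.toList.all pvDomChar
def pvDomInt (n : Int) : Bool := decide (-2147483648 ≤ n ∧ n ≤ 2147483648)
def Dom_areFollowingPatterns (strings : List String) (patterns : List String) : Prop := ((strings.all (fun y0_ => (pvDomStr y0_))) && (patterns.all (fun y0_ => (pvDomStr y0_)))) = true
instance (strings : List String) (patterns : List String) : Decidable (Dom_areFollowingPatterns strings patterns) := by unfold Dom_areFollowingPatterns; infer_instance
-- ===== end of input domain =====

-- B replaces A's two defaultdict(set) tables and their validation loops with one direct
-- pairwise-consistency check over the zipped pairs (simpler code; O(n^2) instead of O(n), no speed claim).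

-- ===== PORT A =====
-- pats[p].add(w); strs[w].add(p) over zip(strings, patterns); then both validation loops
-- (early return False = the all-check; dict iteration is insertion order).
def areFollowingPatterns (strings : List String) (patterns : List String) : Bool :=
  let st := (strings.zip patterns).foldl
    (fun (st : PySem.Dict String (PySem.Set String) × PySem.Dict String (PySem.Set String)) wp =>
      (st.1.modify wp.2 [] (fun s => PySem.Set.add s wp.1),
       st.2.modify wp.1 [] (fun s => PySem.Set.add s wp.2)))
    (PySem.Dict.empty, PySem.Dict.empty)
  let pats := st.1
  let strs := st.2
  if pats.keys.all (fun p => (pats.getD p []).length == 1) then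
    strs.keys.all (fun w => (strs.getD w []).length == 1)
  else false

-- ===== PORT B =====
def areFollowingPatterns_alt (strings : List String) (patterns : List String) : Bool :=
  let pairs := strings.zip patterns
  pairs.all (fun a => pairs.all (fun b => (a.1 == b.1) == (a.2 == b.2)))

-- ===== PRECONDITION & SPEC =====
def Spec_areFollowingPatterns (strings : List String) (patterns : List String) (out : Bool) : Prop := out = areFollowingPatterns_alt strings patterns
instance (strings : List String) (patterns : List String) (out : Bool) : Decidable (Spec_areFollowingPatterns strings patterns out) := by unfold Spec_areFollowingPatterns; infer_instance

-- ===== CLAIM (what is proved, stated in full; the proofs are below) =====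
def Claim_equal_areFollowingPatterns : Prop := ∀ (strings : List String) (patterns : List String), Dom_areFollowingPatterns strings patterns → Spec_areFollowingPatterns strings patterns (areFollowingPatterns strings patterns)

-- ===== LEMMAS AND PROOFS =====

theorem getD_group_fold {α : Type} [BEq α] [LawfulBEq α] [DecidableEq α]
    (l : List (α × α)) (key val : α × α → α) (d : PySem.Dict α (PySem.Set α)) (q : α) :
    (l.foldl (fun d x => d.modify (key x) [] (fun s => PySem.Set.add s (val x))) d).getD q []
      = PySem.Set.update (d.getD q []) ((l.filter (fun x => key x == q)).map val) := by
  induction l generalizing d with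
  | nil => simp [PySem.Set.update]
  | cons x t ih =>
      simp only [List.foldl_cons, ih, List.filter_cons]
      by_cases h : key x = q
      · simp [h, PySem.Set.update]
      · simp [h, PySem.Dict.getD_modify, Ne.symm h]

theorem ofList_length_one {α : Type} [BEq α] [LawfulBEq α]
    (xs : List α) (hne : xs ≠ []) :
    ((PySem.Set.ofList xs).length = 1) ↔ ∀ x ∈ xs, ∀ y ∈ xs, x = y := by
  constructor
  · intro h x hx y hy
    obtain ⟨a, ha⟩ := List.length_eq_one_iff.mp h
    have hx' : x ∈ PySem.Set.ofList xs := (PySem.Set.mem_ofList xs x).mpr hx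
    have hy' : y ∈ PySem.Set.ofList xs := (PySem.Set.mem_ofList xs y).mpr hy
    rw [ha] at hx' hy'
    simp at hx' hy'
    rw [hx', hy']
  · intro h
    cases xs with
    | nil => exact absurd rfl hne
    | cons a t =>
      have hone : PySem.Set.ofList (a :: t) = [a] := by
        have hmem : ∀ x, x ∈ PySem.Set.ofList (a :: t) ↔ x ∈ a :: t :=
          fun x => PySem.Set.mem_ofList (a :: t) x
        have hnd := PySem.Set.nodup_ofList (a :: t)
        cases hS : PySem.Set.ofList (a :: t) with
        | nil =>
            have := (hmem a).mpr (by simp)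
            rw [hS] at this; simp at this
        | cons b u =>
            rw [hS] at hmem hnd
            have hb : b = a := h b ((hmem b).mp (by simp)) a (by simp)
            have hu : u = [] := by
              cases u with
              | nil => rfl
              | cons c v =>
                  have hc : c = a := h c ((hmem c).mp (by simp)) a (by simp)
                  exfalso
                  have : b ≠ c := by
                    have := List.nodup_cons.mp hnd
                    intro hbc; exact this.1 (by simp [hbc])
                  exact this (by rw [hb, hc])
            rw [hb, hu]
      rw [hone]; rfl

theorem loop_char {α : Type} [BEq α] [LawfulBEq α] [DecidableEq α]
    (l : List (α × α)) (key val : α × α → α) :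
    ((l.foldl (fun d x => d.modify (key x) [] (fun s => PySem.Set.add s (val x)))
        (PySem.Dict.empty : PySem.Dict α (PySem.Set α))).keys.all
      (fun q => ((((l.foldl (fun d x => d.modify (key x) [] (fun s => PySem.Set.add s (val x)))
        (PySem.Dict.empty : PySem.Dict α (PySem.Set α))).getD q []).length) == 1))) = true
    ↔ ∀ a ∈ l, ∀ b ∈ l, key a = key b → val a = val b := by
  have hkeys : (l.foldl (fun d x => d.modify (key x) [] (fun s => PySem.Set.add s (val x)))
      (PySem.Dict.empty : PySem.Dict α (PySem.Set α))).keys = PySem.Set.ofList (l.map key) := by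
    rw [PySem.Dict.keys_foldl_modify_key]
    rfl
  have hget : ∀ q, (l.foldl (fun d x => d.modify (key x) [] (fun s => PySem.Set.add s (val x)))
      (PySem.Dict.empty : PySem.Dict α (PySem.Set α))).getD q []
      = PySem.Set.ofList ((l.filter (fun x => key x == q)).map val) := by
    intro q
    rw [getD_group_fold]
    simp [PySem.Dict.getD_empty]
    rfl
  rw [hkeys]
  simp only [List.all_eq_true, hget, beq_iff_eq]
  constructor
  · intro h a ha b hb hk
    have hq : key a ∈ PySem.Set.ofList (l.map key) :=
      (PySem.Set.mem_ofList (l.map key) (key a)).mpr (List.mem_map_of_mem ha)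
    have hone := h (key a) hq
    have hne : (l.filter (fun x => key x == key a)).map val ≠ [] := by
      have : a ∈ l.filter (fun x => key x == key a) := List.mem_filter.mpr ⟨ha, by simp⟩
      intro hc
      simp only [List.map_eq_nil_iff] at hc
      rw [hc] at this; simp at this
    have := (ofList_length_one _ hne).mp hone
    exact this (val a) (List.mem_map_of_mem (List.mem_filter.mpr ⟨ha, by simp⟩))
      (val b) (List.mem_map_of_mem (List.mem_filter.mpr ⟨hb, by simp [hk]⟩))
  · intro h q hq
    have hne : (l.filter (fun x => key x == q)).map val ≠ [] := by
      have hq' := (PySem.Set.mem_ofList (l.map key) q).mp hq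
      obtain ⟨a, ha, rfl⟩ := List.mem_map.mp hq'
      have : a ∈ l.filter (fun x => key x == key a) := List.mem_filter.mpr ⟨ha, by simp⟩
      intro hc
      simp only [List.map_eq_nil_iff] at hc
      rw [hc] at this; simp at this
    refine (ofList_length_one _ hne).mpr ?_
    intro x hx y hy
    obtain ⟨a, ha, rfl⟩ := List.mem_map.mp hx
    obtain ⟨b, hb, rfl⟩ := List.mem_map.mp hy
    have ha' := List.mem_filter.mp ha
    have hb' := List.mem_filter.mp hb
    exact h a ha'.1 b hb'.1 (by
      have h1 : key a = q := by simpa using ha'.2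
      have h2 : key b = q := by simpa using hb'.2
      rw [h1, h2])

theorem main (strings patterns : List String) :
    areFollowingPatterns strings patterns = areFollowingPatterns_alt strings patterns := by
  unfold areFollowingPatterns areFollowingPatterns_alt
  dsimp only
  have hsplit :
      (strings.zip patterns).foldl
        (fun (st : PySem.Dict String (PySem.Set String) × PySem.Dict String (PySem.Set String)) wp =>
          (st.1.modify wp.2 [] (fun s => PySem.Set.add s wp.1),
           st.2.modify wp.1 [] (fun s => PySem.Set.add s wp.2)))
        (PySem.Dict.empty, PySem.Dict.empty)
      = ((strings.zip patterns).foldl (fun d wp => d.modify wp.2 [] (fun s => PySem.Set.add s wp.1)) PySem.Dict.empty,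
         (strings.zip patterns).foldl (fun d wp => d.modify wp.1 [] (fun s => PySem.Set.add s wp.2)) PySem.Dict.empty) :=
    PySem.List.foldl_prod_mk (fun d wp => d.modify wp.2 [] (fun s => PySem.Set.add s wp.1))
      (fun d wp => d.modify wp.1 [] (fun s => PySem.Set.add s wp.2)) (strings.zip patterns)
      PySem.Dict.empty PySem.Dict.empty
  rw [hsplit]
  dsimp only
  rw [Bool.eq_iff_iff]
  have h1 := loop_char (strings.zip patterns) (fun x => x.2) (fun x => x.1)
  have h2 := loop_char (strings.zip patterns) (fun x => x.1) (fun x => x.2)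
  constructor
  · intro h
    split_ifs at h with hc
    · simp only [List.all_eq_true]
      intro a ha b hb
      have hC1 := h1.mp hc a ha b hb
      have hC2 := h2.mp h a ha b hb
      by_cases hab : a.1 = b.1
      · simp [hab, hC2 hab]
      · have : ¬ a.2 = b.2 := fun hp => hab (hC1 hp)
        simp [hab, this]
  · intro h
    simp only [List.all_eq_true] at h
    have hc : ((strings.zip patterns).foldl
        (fun d x => d.modify x.2 [] (fun s => PySem.Set.add s x.1))
        (PySem.Dict.empty : PySem.Dict String (PySem.Set String))).keys.all
        (fun q => ((((strings.zip patterns).foldl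
          (fun d x => d.modify x.2 [] (fun s => PySem.Set.add s x.1))
          (PySem.Dict.empty : PySem.Dict String (PySem.Set String))).getD q []).length) == 1) = true := by
      refine h1.mpr ?_
      intro a ha b hb hk
      have := h a ha b hb
      simp only [beq_iff_eq] at this
      by_contra hne
      rw [Bool.eq_iff_iff] at this
      simp [hne, hk] at this
    rw [if_pos hc]
    refine h2.mpr ?_
    intro a ha b hb hk
    have := h a ha b hb
    simp only [beq_iff_eq] at this
    by_contra hne
    rw [Bool.eq_iff_iff] at this
    simp [hne, hk] at this

-- ===== VERDICT (by name: the statement is the Claim_ definition above) =====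
theorem areFollowingPatterns_spec : Claim_equal_areFollowingPatterns := by
  intro strings patterns _
  unfold Spec_areFollowingPatterns
  exact main strings patterns
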